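-- pv_equiv track=rewrite | github.com/Coffey333/mc-ai | src/personality.py | should_explain_frequency
-- ===== SOURCE A (Python) =====
-- def should_explain_frequency(user_query: str) -> bool:
--     """
--     Detect if user wants technical frequency explanation
--
--     Returns True if query contains frequency-related questions
--     """
--     technical_keywords = [
--         'hz', 'hertz', 'frequency', 'brain wave', 'brainwave',
--         'what frequency', 'how many', 'explain the', 'science',
--         'technical', 'wave', 'oscillation', 'why this frequency'
--     ]
--
--     query_lower = user_query.lower()
--     return any(keyword in query_lower for keyword in technical_keywords)
-- ===== SOURCE B (Python) =====
-- _KEYWORDS = (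
--     'hz', 'hertz', 'frequency', 'brain wave', 'brainwave',
--     'what frequency', 'how many', 'explain the', 'science',
--     'technical', 'wave', 'oscillation', 'why this frequency'
-- )
--
--
-- def should_explain_frequency(user_query: str) -> bool:
--     """Single left-to-right scan: at each position of the lowercased query,
--     test whether any keyword starts there (str.startswith with a tuple)."""
--     q = user_query.lower()
--     return any(q.startswith(_KEYWORDS, i) for i in range(len(q) + 1))
-- ===== Notes on version B (the rewrite author's own statement) =====
-- stated objective: alternative
-- what changed: Replaced the per-keyword substring-containment loop (each 'kw in q' is its own scan of the query) by one left-to-right scan over the positions of the lowercased query, testing at each position whether any keyword starts there via str.startswith with a tuple.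
import Mathlib
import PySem

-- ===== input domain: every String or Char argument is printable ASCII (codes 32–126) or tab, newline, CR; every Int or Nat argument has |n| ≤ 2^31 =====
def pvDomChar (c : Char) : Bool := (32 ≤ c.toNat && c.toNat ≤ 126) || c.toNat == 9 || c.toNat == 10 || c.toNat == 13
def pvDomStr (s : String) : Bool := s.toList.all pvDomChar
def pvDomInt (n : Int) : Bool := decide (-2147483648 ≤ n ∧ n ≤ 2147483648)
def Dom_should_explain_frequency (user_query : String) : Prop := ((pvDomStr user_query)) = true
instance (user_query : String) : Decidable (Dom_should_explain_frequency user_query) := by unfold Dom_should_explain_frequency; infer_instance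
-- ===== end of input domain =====

-- B replaces 13 independent substring scans by one position-by-position scan of the
-- lowercased query, testing at each suffix whether any keyword is a prefix (alternative
-- traversal, same cost).


-- ===== PORT A =====
def should_explain_frequency (user_query : String) : Bool :=
  let technical_keywords : List String :=
    ["hz", "hertz", "frequency", "brain wave", "brainwave",
     "what frequency", "how many", "explain the", "science",
     "technical", "wave", "oscillation", "why this frequency"]
  let query_lower := PySem.Str.lower user_query
  technical_keywords.any (fun keyword => PySem.Str.isIn keyword query_lower)

-- ===== PORT B =====
-- the keyword tuple of Source B, as lists of chars
def sefKeywords : List (List Char) :=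
  ["hz".toList, "hertz".toList, "frequency".toList, "brain wave".toList, "brainwave".toList,
   "what frequency".toList, "how many".toList, "explain the".toList, "science".toList,
   "technical".toList, "wave".toList, "oscillation".toList, "why this frequency".toList]

-- Source B's scan: for each position i in range(len(q)+1), q.startswith(_KEYWORDS, i);
-- position i corresponds to the suffix s.drop i, so we recurse over suffixes.
def sefScan (s : List Char) : Bool :=
  match s with
  | [] => sefKeywords.any (fun k => PySem.Chars.startswith [] k)
  | c :: t => sefKeywords.any (fun k => PySem.Chars.startswith (c :: t) k) || sefScan t

def should_explain_frequency_alt (user_query : String) : Bool :=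
  sefScan (PySem.Str.lower user_query).toList

-- ===== PRECONDITION & SPEC =====
def Spec_should_explain_frequency (user_query : String) (out : Bool) : Prop := out = should_explain_frequency_alt user_query
instance (user_query : String) (out : Bool) : Decidable (Spec_should_explain_frequency user_query out) := by unfold Spec_should_explain_frequency; infer_instance

-- ===== CLAIM (what is proved, stated in full; the proofs are below) =====
def Claim_equal_should_explain_frequency : Prop := ∀ (user_query : String), Dom_should_explain_frequency user_query → Spec_should_explain_frequency user_query (should_explain_frequency user_query)

-- ===== LEMMAS AND PROOFS =====

-- the position scan finds a keyword iff some keyword is an infix (substring) of s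
theorem sefScan_eq_any_isIn (s : List Char) :
    sefScan s = sefKeywords.any (fun k => PySem.Chars.isIn k s) := by
  induction s with
  | nil =>
      simp only [sefScan]
      rw [Bool.eq_iff_iff]
      simp only [List.any_eq_true, PySem.Chars.startswith_iff, PySem.Chars.isIn_iff_infix,
        List.prefix_nil, List.infix_nil]
  | cons c t ih =>
      simp only [sefScan, ih]
      rw [Bool.eq_iff_iff]
      simp only [Bool.or_eq_true, List.any_eq_true,
        PySem.Chars.startswith_iff, PySem.Chars.isIn_iff_infix, List.infix_cons_iff]
      constructor
      · rintro (⟨k, hk, hp⟩ | ⟨k, hk, hi⟩)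
        · exact ⟨k, hk, Or.inl hp⟩
        · exact ⟨k, hk, Or.inr hi⟩
      · rintro ⟨k, hk, hp | hi⟩
        · exact Or.inl ⟨k, hk, hp⟩
        · exact Or.inr ⟨k, hk, hi⟩

-- ===== VERDICT (by name: the statement is the Claim_ definition above) =====
theorem should_explain_frequency_spec : Claim_equal_should_explain_frequency := by
  intro q _
  show should_explain_frequency q = should_explain_frequency_alt q
  unfold should_explain_frequency should_explain_frequency_alt
  rw [sefScan_eq_any_isIn]
  simp only [sefKeywords, List.any_cons, List.any_nil, PySem.Str.isIn_eq]
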